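-- pv_equiv track=rewrite | github.com/baoy-nlp/NLPTools | seq2seq/parser_utils.py | seq2tree
-- ===== SOURCE A (Python) =====
-- def seq2tree(translate):
--     """
--     Args:
--         words: the input of translation method
--         translate: the output of translation method
--
--     Return:
--         PTB Format Plain Text
--     Raise:
--         Do not Match Exception
--     """
--     if not translate[-1].endswith("/" + translate[0]):
--         translate.append("/" + translate[0])
--
--     translate = pre_valid_process(translate)
--
--     stack = []
--     WORD = " XX)"
--     for item in translate:
--         if not item.startswith("/"):
--             stack.append((item, False))
--         else:
--             key = item[1:]
--             span_length = 1
--             for span_length in range(1, len(stack) + 1):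
--                 if stack[-span_length][0] == key:
--                     break
--                 else:
--                     span_length += 1
--             if 1 < span_length <= len(stack):
--                 new_node = ")"
--                 for _ in range(span_length - 1):
--                     p = stack.pop()
--                     if p[1]:
--                         new_node = " " + p[0] + new_node
--                     else:
--                         word = "(" + p[0] + WORD
--                         new_node = " " + word + new_node
--                 p = stack.pop()
--                 new_p = ("(" + p[0] + new_node, True)
--                 stack.append(new_p)
--     res_list = [s[0] for s in stack]
--     res = "(S " + " ".join(res_list) + ")" if len(res_list) > 0 else "(S (XX XX))"
--
--     res = post_valid_process(res)
--     # tree = PhraseTree.parse(res)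
--
--     return res
--
-- def pre_valid_process(seq):
--     left_key = seq[0]
--     right_key = "/" + seq[0]
--     left_count = 1
--     right_count = 0
--     for item in seq:
--         if item == left_key:
--             left_count += 1
--         if item == right_key:
--             right_count += 1
--
--     if right_count > left_count:
--         base = [left_key] * (right_count - left_count)
--         base.extend(seq)
--         seq = base
--     else:
--         seq.extend([right_key] * (left_count - right_count))
--     return seq
--
-- def post_valid_process(seq):
--     seqs = seq.split(" ")
--     res = []
--     for item in seqs:
--         if item.startswith("(") or item.endswith(")"):
--             res.append(item)
--     return " ".join(res)
-- ===== SOURCE B (Python) =====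
-- # B: global rewriting on the token list -- repeatedly resolve the leftmost close tag by
-- # slicing out its span and replacing it with an explicit tree node (label, children, cached
-- # text) -- instead of A's single left-to-right pass over a pushdown stack.
-- # Equivalence is about the RETURN value only: A mutates `translate`, B does not.
-- def seq2tree(translate):
--     toks = list(translate)
--     if not toks[-1].endswith("/" + toks[0]):
--         toks.append("/" + toks[0])
--     first, close0 = toks[0], "/" + toks[0]
--     opens = 1 + toks.count(first)
--     closes = toks.count(close0)
--     if closes > opens:
--         toks = [first] * (closes - opens) + toks
--     else:
--         toks = toks + [close0] * (opens - closes)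
--
--     def text(e):          # display text of a top-level element
--         return e if isinstance(e, str) else e[3]
--
--     def child_text(c):    # display text of a child
--         return "(" + c[1] + " XX)" if c[0] == 'L' else c[3]
--
--     elems = toks          # str = raw token, ('L', w) = leaf, ('N', label, kids, txt) = node
--     while True:
--         j = next((i for i, e in enumerate(elems)
--                   if isinstance(e, str) and e.startswith("/")), None)
--         if j is None:
--             break
--         key = elems[j][1:]
--         pre, post = elems[:j], elems[j + 1:]
--         k = next((i for i, e in enumerate(reversed(pre)) if text(e) == key), None)
--         if k is not None and k >= 1:
--             m = len(pre) - 1 - k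
--             kids = [('L', e) if isinstance(e, str) else e for e in pre[m + 1:]]
--             txt = "(" + key + " " + " ".join(child_text(c) for c in kids) + ")"
--             elems = pre[:m] + [('N', key, kids, txt)] + post
--         else:
--             elems = pre + post
--
--     out = [text(e) for e in elems]
--     res = "(S " + " ".join(out) + ")" if out else "(S (XX XX))"
--     return " ".join(w for w in res.split(" ") if w.startswith("(") or w.endswith(")"))
-- ===== Notes on version B (the rewrite author's own statement) =====
-- stated objective: alternative
-- what changed: B abandons A's single left-to-right pass over a pushdown stack: it runs a rewriting loop on the whole token list that repeatedly locates the leftmost unresolved close tag, scans the prefix before it right-to-left for the nearest element whose text matches, and splices that span out as an explicit tree node (label, children, cached rendering); the padding/filter passes use count/filter instead of counting and appending loops.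
import Mathlib
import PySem

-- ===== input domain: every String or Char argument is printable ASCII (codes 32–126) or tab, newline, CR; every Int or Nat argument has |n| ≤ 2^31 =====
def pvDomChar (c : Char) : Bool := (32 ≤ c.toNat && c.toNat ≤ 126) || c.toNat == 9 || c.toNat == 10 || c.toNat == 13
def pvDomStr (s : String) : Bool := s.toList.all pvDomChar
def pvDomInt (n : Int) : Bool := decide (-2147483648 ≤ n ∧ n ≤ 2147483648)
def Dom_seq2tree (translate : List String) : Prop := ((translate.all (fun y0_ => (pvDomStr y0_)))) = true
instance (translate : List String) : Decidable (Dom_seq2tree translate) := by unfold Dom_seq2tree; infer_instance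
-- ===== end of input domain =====

-- B replaces A's single left-to-right pass over a pushdown stack by a rewriting loop on the
-- whole token list (repeatedly resolve the leftmost close tag by splicing its span out as an
-- explicit tree node with a cached rendering); the equivalence is about the return value only —
-- A mutates its argument list, B does not.

-- ===== PORT A =====
-- pre_valid_process: the counting loop, then pad left or right
def pvPreA (seq : List String) : List String :=
  match seq with
  | [] => []          -- Python's seq[0] raises IndexError on []; unreachable from seq2tree on Pre_
  | lk :: _ =>
    let rk := "/" ++ lk
    let c := seq.foldl
      (fun (c : Int × Int) item =>
        (if item == lk then c.1 + 1 else c.1, if item == rk then c.2 + 1 else c.2)) (1, 0)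
    if c.2 > c.1 then List.replicate (c.2 - c.1).toNat lk ++ seq
    else seq ++ List.replicate (c.1 - c.2).toNat rk

-- the inner `for span_length in range(1, len(stack)+1): … break` search (list head = Python stack top)
def pvFindA (st : List (String × Bool)) (key : String) (s : Nat) : Nat :=
  match st with
  | [] => s
  | p :: rest => if p.1 == key then s else pvFindA rest key (s + 1)

-- the `for _ in range(span_length - 1): p = stack.pop() …` loop building new_node
def pvPopA : Nat → List (String × Bool) → String → List (String × Bool) × String
  | 0, st, nn => (st, nn)
  | _ + 1, [], nn => ([], nn)     -- unreachable: the caller pops at most len(stack) - 1 items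
  | n + 1, p :: rest, nn =>
      pvPopA n rest (if p.2 then " " ++ p.1 ++ nn else " " ++ ("(" ++ p.1 ++ " XX)") ++ nn)

-- one iteration of A's main `for item in translate` loop
def pvStepA (stack : List (String × Bool)) (item : String) : List (String × Bool) :=
  if !(PySem.Str.startswith item "/") then (item, false) :: stack
  else
    let key := PySem.Str.slice item (some 1) none
    let span := pvFindA stack key 1
    if 1 < span ∧ span ≤ stack.length then
      match pvPopA (span - 1) stack ")" with
      | (p :: rest, nn) => ("(" ++ p.1 ++ nn, true) :: rest
      | ([], _) => stack            -- unreachable: span ≤ len(stack)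
    else stack

-- post_valid_process
def pvPostA (s : String) : String :=
  let seqs := (PySem.Str.split? s " ").getD []    -- sep = " " ≠ "": split? is `some`
  let res := seqs.foldl
    (fun acc item =>
      if PySem.Str.startswith item "(" || PySem.Str.endswith item ")" then acc ++ [item] else acc)
    ([] : List String)
  PySem.Str.join " " res

def seq2tree (translate : List String) : String :=
  match translate with
  | [] => ""          -- Python raises IndexError on []; outside Pre_
  | t0 :: _ =>
    let tr := if !(PySem.Str.endswith (PySem.List.pyGetD translate (-1) "") ("/" ++ t0)) then
        translate ++ ["/" ++ t0] else translate
    let tr2 := pvPreA tr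
    let stack := tr2.foldl pvStepA []
    let resList := stack.reverse.map Prod.fst
    let res := if resList.length > 0 then "(S " ++ PySem.Str.join " " resList ++ ")"
               else "(S (XX XX))"
    pvPostA res

-- ===== PORT B =====
-- explicit trees: ('L', w) = leaf, ('N', label, kids, cached text) = node
mutual
inductive PVTree where
  | leaf : String → PVTree
  | node : String → PVForest → String → PVTree
inductive PVForest where
  | fnil : PVForest
  | fcons : PVTree → PVForest → PVForest
end

-- a worklist element: a raw token string or a tree
inductive PVElem where
  | tok : String → PVElem
  | tre : PVTree → PVElem

-- Source B's text(e): the display text of a top-level element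
def pvTextB : PVElem → String
  | .tok s => s
  | .tre (.node _ _ t) => t
  | .tre (.leaf w) => "(" ++ w ++ " XX)"   -- unreachable: top-level trees are always nodes

-- Source B's child_text(c)
def pvChildText : PVTree → String
  | .leaf w => "(" ++ w ++ " XX)"
  | .node _ _ t => t

-- kids = [('L', e) if isinstance(e, str) else e for e in pre[m+1:]]
def pvToKids : List PVElem → PVForest
  | [] => .fnil
  | .tok s :: r => .fcons (.leaf s) (pvToKids r)
  | .tre t :: r => .fcons t (pvToKids r)

def pvForestTexts : PVForest → List String
  | .fnil => []
  | .fcons t f => pvChildText t :: pvForestTexts f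

-- `next((i for i, e in enumerate(elems) if isinstance(e, str) and e.startswith("/")), None)`
-- together with the slices elems[:j] / elems[j+1:]
def pvSplitB : List PVElem → Option (List PVElem × String × List PVElem)
  | [] => none
  | .tok s :: r =>
      if PySem.Str.startswith s "/" then some ([], s, r)
      else (pvSplitB r).map (fun x => (PVElem.tok s :: x.1, x.2.1, x.2.2))
  | .tre t :: r => (pvSplitB r).map (fun x => (PVElem.tre t :: x.1, x.2.1, x.2.2))

-- `next((i for i, e in enumerate(reversed(pre)) if text(e) == key), None)`
def pvIdxR : List PVElem → String → Nat → Option Nat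
  | [], _, _ => none
  | e :: r, key, c => if pvTextB e == key then some c else pvIdxR r key (c + 1)

-- the while loop: resolve the leftmost close tag, repeat until none is left.
-- fuel = list length is a pure totality guard: every pass removes at least the close tag,
-- so the loop always ends before the fuel does.
def pvReduceGo : Nat → List PVElem → List PVElem
  | 0, elems => elems
  | fuel + 1, elems =>
    match pvSplitB elems with
    | none => elems
    | some (pre, item, post) =>
      match pvIdxR pre.reverse (PySem.Str.slice item (some 1) none) 0 with
      | some k =>
        if 1 ≤ k then
          pvReduceGo fuel (pre.take (pre.length - 1 - k)
            ++ [PVElem.tre (.node (PySem.Str.slice item (some 1) none)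
                  (pvToKids (pre.drop (pre.length - 1 - k + 1)))
                  ("(" ++ PySem.Str.slice item (some 1) none ++ " "
                    ++ PySem.Str.join " "
                        (pvForestTexts (pvToKids (pre.drop (pre.length - 1 - k + 1)))) ++ ")"))]
            ++ post)
        else pvReduceGo fuel (pre ++ post)
      | none => pvReduceGo fuel (pre ++ post)

def pvReduceB (elems : List PVElem) : List PVElem := pvReduceGo elems.length elems

-- pre-padding via count instead of a counting loop
def pvPreB (seq : List String) : List String :=
  match seq with
  | [] => []          -- Python's seq[0] raises IndexError on []; unreachable from seq2tree_alt on Pre_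
  | lk :: _ =>
    let rk := "/" ++ lk
    let lc : Int := 1 + (PySem.List.count seq lk : Int)
    let rc : Int := (PySem.List.count seq rk : Int)
    if rc > lc then List.replicate (rc - lc).toNat lk ++ seq
    else seq ++ List.replicate (lc - rc).toNat rk

-- post-processing as a filter
def pvPostB (s : String) : String :=
  PySem.Str.join " "
    (((PySem.Str.split? s " ").getD []).filter
      (fun item => PySem.Str.startswith item "(" || PySem.Str.endswith item ")"))

def seq2tree_alt (translate : List String) : String :=
  match translate with
  | [] => ""          -- Python raises IndexError on []; outside Pre_
  | t0 :: _ =>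
    let tr := if !(PySem.Str.endswith (PySem.List.pyGetD translate (-1) "") ("/" ++ t0)) then
        translate ++ ["/" ++ t0] else translate
    let tr2 := pvPreB tr
    let elems := pvReduceB (tr2.map PVElem.tok)
    let out := elems.map pvTextB
    let res := if out.length > 0 then "(S " ++ PySem.Str.join " " out ++ ")"
               else "(S (XX XX))"
    pvPostB res

-- ===== PRECONDITION & SPEC =====
-- Pre_ excludes only the empty list, on which Python's `translate[-1]` raises IndexError.
def Pre_seq2tree (translate : List String) : Prop := translate ≠ []
instance (translate : List String) : Decidable (Pre_seq2tree translate) := by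
  unfold Pre_seq2tree; infer_instance
def pvWitness_seq2tree : List String := ["NP", "hello", "/NP"]

def Spec_seq2tree (translate : List String) (out : String) : Prop := out = seq2tree_alt translate
instance (translate : List String) (out : String) : Decidable (Spec_seq2tree translate out) := by
  unfold Spec_seq2tree; infer_instance

-- ===== CLAIM (what is proved, stated in full; the proofs are below) =====
def Claim_equal_seq2tree : Prop := ∀ (translate : List String), Dom_seq2tree translate →
  Pre_seq2tree translate → Spec_seq2tree translate (seq2tree translate)

-- ===== LEMMAS AND PROOFS =====

-- the stack entry A keeps for a worklist element
def pvEntry : PVElem → String × Bool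
  | .tok s => (s, false)
  | .tre t => (pvTextB (.tre t), true)

def pvIsClose : PVElem → Bool
  | .tok s => PySem.Str.startswith s "/"
  | .tre _ => false

-- the text an element contributes when it becomes a child of a new node
def pvCRend : PVElem → String
  | .tok s => "(" ++ s ++ " XX)"
  | .tre t => pvChildText t

-- the string A's new_node accumulates while popping the elements of f (f = children top-first)
def pvPieces : List PVElem → String
  | [] => ""
  | e :: r => pvPieces r ++ (" " ++ pvCRend e)

-- A's fold generalised to a worklist: a tree element is pushed as its (text, True) entry
def pvGenFold : List PVElem → List (String × Bool) → List (String × Bool)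
  | [], st => st
  | .tok s :: r, st => pvGenFold r (pvStepA st s)
  | .tre t :: r, st => pvGenFold r ((pvTextB (.tre t), true) :: st)

lemma pvEntry_fst (e : PVElem) : (pvEntry e).1 = pvTextB e := by cases e <;> rfl

lemma stepA_push (st : List (String × Bool)) (s : String)
    (hs : PySem.Str.startswith s "/" = false) : pvStepA st s = (s, false) :: st := by
  unfold pvStepA; rw [hs]; rfl

lemma tre_text (t : PVTree) : pvTextB (.tre t) = pvChildText t := by cases t <;> rfl

lemma genFold_tok (l : List String) : ∀ st, pvGenFold (l.map PVElem.tok) st = l.foldl pvStepA st := by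
  induction l with
  | nil => intro st; rfl
  | cons x xs ih => intro st; simpa [pvGenFold] using ih (pvStepA st x)

lemma genFold_append (a b : List PVElem) : ∀ st, pvGenFold (a ++ b) st = pvGenFold b (pvGenFold a st) := by
  induction a with
  | nil => intro st; rfl
  | cons e r ih => intro st; cases e <;> simp [pvGenFold, ih]

lemma genFold_noclose (l : List PVElem) : ∀ st, (∀ e ∈ l, pvIsClose e = false) →
    pvGenFold l st = (l.map pvEntry).reverse ++ st := by
  induction l with
  | nil => intro st _; rfl
  | cons e r ih =>
    intro st h
    cases e with
    | tok s =>
      have hs : PySem.Str.startswith s "/" = false := h (.tok s) (List.mem_cons_self ..)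
      show pvGenFold r (pvStepA st s) = _
      rw [ih _ (fun x hx => h x (List.mem_cons_of_mem _ hx)), stepA_push st s hs]
      simp [pvEntry]
    | tre t =>
      show pvGenFold r ((pvTextB (.tre t), true) :: st) = _
      rw [ih _ (fun x hx => h x (List.mem_cons_of_mem _ hx))]
      simp [pvEntry]

-- pvSplitB invariants beyond the shape used for termination
lemma pvSplitB_none_spec : ∀ {l : List PVElem}, pvSplitB l = none → ∀ e ∈ l, pvIsClose e = false := by
  intro l
  induction l with
  | nil => intro _ e he; simp at he
  | cons e r ih =>
    intro h x hx
    cases e with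
    | tok s =>
      rw [pvSplitB] at h
      split at h
      · simp at h
      · rcases List.mem_cons.mp hx with hx | hx
        · subst hx
          simp only [pvIsClose]
          rename_i hs; simpa using hs
        · exact ih (by simpa using h) x hx
    | tre t =>
      rcases List.mem_cons.mp hx with hx | hx
      · subst hx; rfl
      · rw [pvSplitB] at h
        exact ih (by simpa using h) x hx

lemma pvSplitB_some_spec : ∀ {l pre post : List PVElem} {it : String},
    pvSplitB l = some (pre, it, post) →
    (∀ e ∈ pre, pvIsClose e = false) ∧ PySem.Str.startswith it "/" = true := by
  intro l
  induction l with
  | nil => intro pre post it h; simp [pvSplitB] at h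
  | cons e r ih =>
    intro pre post it h
    cases e with
    | tok s =>
      rw [pvSplitB] at h
      split at h
      · simp at h
        obtain ⟨h1, h2, h3⟩ := h
        rename_i hs
        refine ⟨?_, by rw [← h2]; exact hs⟩
        intro x hx; simp [h1] at hx
      · match hr : pvSplitB r with
        | none => rw [hr] at h; simp at h
        | some (p, i2, q) =>
          rw [hr] at h; simp at h
          obtain ⟨h1, h2, h3⟩ := h
          obtain ⟨hp, hi⟩ := ih hr
          refine ⟨?_, by rw [← h2]; exact hi⟩
          intro x hx
          rw [← h1] at hx
          rcases List.mem_cons.mp hx with hx | hx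
          · subst hx
            simp only [pvIsClose]
            rename_i hs; simpa using hs
          · exact hp x hx
    | tre t =>
      rw [pvSplitB] at h
      match hr : pvSplitB r with
      | none => rw [hr] at h; simp at h
      | some (p, i2, q) =>
        rw [hr] at h; simp at h
        obtain ⟨h1, h2, h3⟩ := h
        obtain ⟨hp, hi⟩ := ih hr
        refine ⟨?_, by rw [← h2]; exact hi⟩
        intro x hx
        rw [← h1] at hx
        rcases List.mem_cons.mp hx with hx | hx
        · subst hx; rfl
        · exact hp x hx

-- pvIdxR characterisations
lemma pvIdxR_none_spec : ∀ {l : List PVElem} {key : String} {c : Nat},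
    pvIdxR l key c = none → ∀ e ∈ l, (pvTextB e == key) = false := by
  intro l
  induction l with
  | nil => intro key c _ e he; simp at he
  | cons e r ih =>
    intro key c h x hx
    simp only [pvIdxR] at h
    split at h
    · simp at h
    · rcases List.mem_cons.mp hx with hx | hx
      · subst hx; rename_i hs; simpa using hs
      · exact ih h x hx

lemma pvIdxR_some_spec : ∀ {l : List PVElem} {key : String} {c k : Nat},
    pvIdxR l key c = some k →
    ∃ f e b, l = f ++ e :: b ∧ f.length = k - c ∧ c ≤ k ∧
      (∀ x ∈ f, (pvTextB x == key) = false) ∧ pvTextB e = key := by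
  intro l
  induction l with
  | nil => intro key c k h; simp [pvIdxR] at h
  | cons e r ih =>
    intro key c k h
    simp only [pvIdxR] at h
    split at h
    · simp at h
      rename_i hs
      refine ⟨[], e, r, by simp, by simp [h], by simp [h], by simp, by simpa using hs⟩
    · obtain ⟨f, e2, b, hl, hf, hc, hnm, ht⟩ := ih h
      rename_i hs
      refine ⟨e :: f, e2, b, by simp [hl], ?_, by omega, ?_, ht⟩
      · simp only [List.length_cons]; omega
      · intro x hx
        rcases List.mem_cons.mp hx with hx | hx
        · subst hx; simpa using hs
        · exact hnm x hx

-- A's inner search skips non-matching entries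
lemma pvFindA_skip (key : String) : ∀ (f : List PVElem) (rest : List (String × Bool)) (s : Nat),
    (∀ x ∈ f, (pvTextB x == key) = false) →
    pvFindA (f.map pvEntry ++ rest) key s = pvFindA rest key (s + f.length) := by
  intro f
  induction f with
  | nil => intro rest s _; simp
  | cons x f' ih =>
    intro rest s h
    have hx : ((pvEntry x).1 == key) = false := by
      rw [pvEntry_fst]; exact h x (List.mem_cons_self ..)
    show pvFindA (pvEntry x :: (f'.map pvEntry ++ rest)) key s = _
    rw [show pvFindA (pvEntry x :: (f'.map pvEntry ++ rest)) key s
        = if (pvEntry x).1 == key then s else pvFindA (f'.map pvEntry ++ rest) key (s + 1) from rfl,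
      hx]
    simp only [Bool.false_eq_true, if_false]
    rw [ih rest (s + 1) (fun y hy => h y (List.mem_cons_of_mem _ hy))]
    congr 1
    simp only [List.length_cons]
    omega

-- A's pop loop over the entries of f produces exactly the children string
lemma popA_rev : ∀ (f : List PVElem) (rest : List (String × Bool)) (acc : String),
    pvPopA f.length (f.map pvEntry ++ rest) acc = (rest, pvPieces f ++ acc) := by
  intro f
  induction f with
  | nil =>
    intro rest acc
    have : pvPieces [] ++ acc = acc := by
      apply String.toList_inj.mp; simp [pvPieces]
    simp [pvPopA, this]
  | cons x f' ih =>
    intro rest acc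
    show pvPopA (f'.length + 1) (pvEntry x :: (f'.map pvEntry ++ rest)) acc = _
    rw [pvPopA]
    have harg : (if (pvEntry x).2 then " " ++ (pvEntry x).1 ++ acc
        else " " ++ ("(" ++ (pvEntry x).1 ++ " XX)") ++ acc) = (" " ++ pvCRend x) ++ acc := by
      cases x with
      | tok s => simp [pvEntry, pvCRend, String.append_assoc]
      | tre t => simp [pvEntry, pvCRend, tre_text, String.append_assoc]
    rw [harg, ih]
    have : pvPieces (x :: f') ++ acc = pvPieces f' ++ ((" " ++ pvCRend x) ++ acc) := by
      show (pvPieces f' ++ (" " ++ pvCRend x)) ++ acc = _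
      rw [String.append_assoc]
    rw [this]

lemma forestTexts_toKids (l : List PVElem) : pvForestTexts (pvToKids l) = l.map pvCRend := by
  induction l with
  | nil => rfl
  | cons e r ih =>
    cases e <;> simp [pvToKids, pvForestTexts, pvCRend, pvChildText, ih]

lemma join_cons_ne (sep p : List Char) (L : List (List Char)) (h : L ≠ []) :
    PySem.Chars.join sep (p :: L) = p ++ sep ++ PySem.Chars.join sep L := by
  cases L with
  | nil => exact absurd rfl h
  | cons a as => exact PySem.Chars.join_cons_cons sep p a as

lemma join_append_singleton (sep p : List Char) : ∀ (L : List (List Char)), L ≠ [] →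
    PySem.Chars.join sep (L ++ [p]) = PySem.Chars.join sep L ++ sep ++ p := by
  intro L
  induction L with
  | nil => intro h; exact absurd rfl h
  | cons q l ih =>
    intro _
    cases l with
    | nil => simp [PySem.Chars.join_cons_cons, PySem.Chars.join_singleton]
    | cons a as =>
      rw [List.cons_append, join_cons_ne sep q ((a :: as) ++ [p]) (by simp),
          join_cons_ne sep q (a :: as) (by simp), ih (by simp)]
      simp

-- the popped pieces equal " " ++ join of the children texts
lemma pieces_join : ∀ (f : List PVElem), f ≠ [] →
    pvPieces f = " " ++ PySem.Str.join " " (f.reverse.map pvCRend) := by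
  intro f
  induction f with
  | nil => intro h; exact absurd rfl h
  | cons x f' ih =>
    intro _
    cases f' with
    | nil =>
      apply String.toList_inj.mp
      simp [pvPieces, PySem.Str.toList_join, PySem.Chars.join_singleton]
    | cons y f'' =>
      have hrev : (x :: y :: f'').reverse = (y :: f'').reverse ++ [x] := by simp
      rw [show pvPieces (x :: y :: f'') = pvPieces (y :: f'') ++ (" " ++ pvCRend x) from rfl,
          ih (by simp), hrev, List.map_append]
      apply String.toList_inj.mp
      simp only [String.toList_append, PySem.Str.toList_join, List.map_append, List.map_cons,
        List.map_nil]
      rw [join_append_singleton _ _ _ (by simp)]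
      simp

theorem pvSplitB_some : ∀ {l pre post : List PVElem} {it : String},
    pvSplitB l = some (pre, it, post) → l = pre ++ PVElem.tok it :: post := by
  intro l
  induction l with
  | nil => intro pre post it h; simp [pvSplitB] at h
  | cons e r ih =>
    intro pre post it h
    match e with
    | .tok s =>
      rw [pvSplitB] at h
      split at h
      · simp at h
        obtain ⟨h1, h2, h3⟩ := h
        simp [← h1, ← h2, ← h3]
      · match hr : pvSplitB r with
        | none => rw [hr] at h; simp at h
        | some (p, i2, q) =>
          rw [hr] at h; simp at h
          obtain ⟨h1, h2, h3⟩ := h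
          rw [← h1, ← h2, ← h3]
          simpa using ih hr
    | .tre t =>
      rw [pvSplitB] at h
      match hr : pvSplitB r with
      | none => rw [hr] at h; simp at h
      | some (p, i2, q) =>
        rw [hr] at h; simp at h
        obtain ⟨h1, h2, h3⟩ := h
        rw [← h1, ← h2, ← h3]
        simpa using ih hr


theorem pvIdxR_lt : ∀ {l : List PVElem} {key : String} {c k : Nat},
    pvIdxR l key c = some k → c ≤ k ∧ k - c < l.length := by
  intro l
  induction l with
  | nil => intro key c k h; simp [pvIdxR] at h
  | cons e r ih =>
    intro key c k h
    simp only [pvIdxR] at h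
    split at h
    · simp at h; simp only [List.length_cons]; omega
    · have := ih h; simp only [List.length_cons]; omega


-- splitting A's generalised fold at the leftmost close tag
lemma split_fold {elems pre post : List PVElem} {item : String}
    (hs : pvSplitB elems = some (pre, item, post)) :
    pvGenFold elems [] = pvGenFold post (pvStepA ((pre.map pvEntry).reverse) item) := by
  rw [pvSplitB_some hs,
    show pre ++ PVElem.tok item :: post = pre ++ ([PVElem.tok item] ++ post) from by simp,
    genFold_append, genFold_append, genFold_noclose pre [] (pvSplitB_some_spec hs).1,
    List.append_nil]
  rfl

-- A's step is a no-op when the close tag matches nothing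
lemma stepA_noop_none {pre : List PVElem} {item : String}
    (hit : PySem.Str.startswith item "/" = true)
    (hnm : ∀ e ∈ pre.reverse, (pvTextB e == PySem.Str.slice item (some 1) none) = false) :
    pvStepA ((pre.map pvEntry).reverse) item = (pre.map pvEntry).reverse := by
  have hspan : pvFindA ((pre.map pvEntry).reverse) (PySem.Str.slice item (some 1) none) 1
      = 1 + pre.length := by
    rw [show ((pre.map pvEntry).reverse : List (String × Bool))
          = pre.reverse.map pvEntry ++ [] from by simp,
      pvFindA_skip _ pre.reverse [] 1 hnm]
    simp [pvFindA]
  unfold pvStepA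
  rw [hit]
  simp only [Bool.not_true, Bool.false_eq_true, if_false, hspan]
  rw [if_neg (by simp only [List.length_reverse, List.length_map]; omega)]

-- … and when the match is the top of the stack (span 1)
lemma stepA_noop_zero {pre b : List PVElem} {e : PVElem} {item : String}
    (hit : PySem.Str.startswith item "/" = true)
    (hrev : pre.reverse = e :: b)
    (ht : pvTextB e = PySem.Str.slice item (some 1) none) :
    pvStepA ((pre.map pvEntry).reverse) item = (pre.map pvEntry).reverse := by
  have hS : ((pre.map pvEntry).reverse : List (String × Bool))
      = pvEntry e :: b.map pvEntry := by
    rw [show ((pre.map pvEntry).reverse : List (String × Bool))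
          = pre.reverse.map pvEntry from by simp, hrev]
    rfl
  have hspan : pvFindA ((pre.map pvEntry).reverse) (PySem.Str.slice item (some 1) none) 1
      = 1 := by
    rw [hS, show pvFindA (pvEntry e :: b.map pvEntry) (PySem.Str.slice item (some 1) none) 1
        = if (pvEntry e).1 == PySem.Str.slice item (some 1) none then 1
          else pvFindA (b.map pvEntry) (PySem.Str.slice item (some 1) none) 2 from rfl,
      if_pos (by rw [pvEntry_fst, ht]; exact beq_self_eq_true _)]
  unfold pvStepA
  rw [hit]
  simp only [Bool.not_true, Bool.false_eq_true, if_false, hspan]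
  rw [if_neg (by omega)]

-- core invariant: the rewriting loop preserves A's generalised fold, and its result is close-free
lemma reduce_go : ∀ (fuel : Nat) (elems : List PVElem), elems.length ≤ fuel →
    pvGenFold (pvReduceGo fuel elems) [] = pvGenFold elems [] ∧
    (∀ e ∈ pvReduceGo fuel elems, pvIsClose e = false) := by
  intro fuel
  induction fuel with
  | zero =>
    intro elems h
    have hnil : elems = [] := List.eq_nil_of_length_eq_zero (by omega)
    subst hnil
    exact ⟨rfl, by intro e he; simp [pvReduceGo] at he⟩
  | succ fuel ih =>
    intro elems hlen
    cases hsp : pvSplitB elems with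
    | none =>
      have hred : pvReduceGo (fuel + 1) elems = elems := by
        simp only [pvReduceGo, hsp]
      rw [hred]
      exact ⟨rfl, pvSplitB_none_spec hsp⟩
    | some x =>
      obtain ⟨pre, item, post⟩ := x
      have hlx := congrArg List.length (pvSplitB_some hsp)
      simp only [List.length_append, List.length_cons] at hlx
      have hit := (pvSplitB_some_spec hsp).2
      cases hk : pvIdxR pre.reverse (PySem.Str.slice item (some 1) none) 0 with
      | none =>
        have hred : pvReduceGo (fuel + 1) elems = pvReduceGo fuel (pre ++ post) := by
          simp only [pvReduceGo, hsp, hk]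
        have hih := ih (pre ++ post) (by simp; omega)
        refine ⟨?_, fun e' he' => hih.2 e' (hred ▸ he')⟩
        rw [hred, hih.1, split_fold hsp,
          stepA_noop_none hit (pvIdxR_none_spec hk),
          genFold_append, genFold_noclose pre [] (pvSplitB_some_spec hsp).1, List.append_nil]
      | some k =>
        have hklt : k < pre.length := by
          have := pvIdxR_lt hk; simp at this; omega
        obtain ⟨f, e, b, hrev, hflen0, _, hnm, ht⟩ := pvIdxR_some_spec hk
        have hflen : f.length = k := by omega
        by_cases hk1 : 1 ≤ k
        case neg =>
          have hf : f = [] := by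
            have : f.length = 0 := by omega
            exact List.length_eq_zero_iff.mp this
          rw [hf, List.nil_append] at hrev
          have hred : pvReduceGo (fuel + 1) elems = pvReduceGo fuel (pre ++ post) := by
            simp only [pvReduceGo, hsp, hk]
            rw [if_neg hk1]
          have hih := ih (pre ++ post) (by simp; omega)
          refine ⟨?_, fun e' he' => hih.2 e' (hred ▸ he')⟩
          rw [hred, hih.1, split_fold hsp, stepA_noop_zero hit hrev ht,
            genFold_append, genFold_noclose pre [] (pvSplitB_some_spec hsp).1, List.append_nil]
        case pos =>
          have hfne : f ≠ [] := by
            intro hc; rw [hc] at hflen; simp at hflen; omega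
          have hpre : pre = b.reverse ++ e :: f.reverse := by
            rw [← List.reverse_reverse pre, hrev]
            simp
          have hm : pre.length - 1 - k = b.length := by
            rw [hpre]; simp; omega
          have htake : pre.take (pre.length - 1 - k) = b.reverse := by
            rw [hm, hpre, show (b.length : Nat) = b.reverse.length from by simp, List.take_left]
          have hdrop : pre.drop (pre.length - 1 - k + 1) = f.reverse := by
            rw [hm, hpre, show (b.reverse ++ e :: f.reverse : List PVElem)
                  = (b.reverse ++ [e]) ++ f.reverse from by simp,
              List.drop_left' (by simp)]
          have hS : ((pre.map pvEntry).reverse : List (String × Bool))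
              = f.map pvEntry ++ (pvEntry e :: b.map pvEntry) := by
            rw [hpre]; simp
          have hspan : pvFindA ((pre.map pvEntry).reverse)
              (PySem.Str.slice item (some 1) none) 1 = 1 + k := by
            rw [hS, pvFindA_skip _ f _ 1 hnm,
              show pvFindA (pvEntry e :: b.map pvEntry) (PySem.Str.slice item (some 1) none)
                  (1 + f.length)
                = if (pvEntry e).1 == PySem.Str.slice item (some 1) none then 1 + f.length
                  else pvFindA (b.map pvEntry) (PySem.Str.slice item (some 1) none)
                    (1 + f.length + 1)
                from rfl,
              if_pos (by rw [pvEntry_fst, ht]; exact beq_self_eq_true _), hflen]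
          have hstep : pvStepA ((pre.map pvEntry).reverse) item
              = ("(" ++ PySem.Str.slice item (some 1) none ++ (pvPieces f ++ ")"), true)
                  :: b.map pvEntry := by
            unfold pvStepA
            rw [hit]
            simp only [Bool.not_true, Bool.false_eq_true, if_false, hspan]
            have hcond : 1 < 1 + k ∧
                1 + k ≤ ((pre.map pvEntry).reverse : List (String × Bool)).length := by
              constructor
              · omega
              · rw [hS]
                simp only [List.length_append, List.length_cons, List.length_map]
                omega
            rw [if_pos hcond, show 1 + k - 1 = f.length from by omega, hS, popA_rev]
            simp only [pvEntry_fst, ht]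
          have htxt : ("(" ++ PySem.Str.slice item (some 1) none ++ " "
                ++ PySem.Str.join " "
                    (pvForestTexts (pvToKids (pre.drop (pre.length - 1 - k + 1)))) ++ ")")
              = "(" ++ PySem.Str.slice item (some 1) none ++ (pvPieces f ++ ")") := by
            rw [hdrop, forestTexts_toKids, pieces_join f hfne]
            apply String.toList_inj.mp
            simp [String.toList_append]
          have hred : pvReduceGo (fuel + 1) elems
              = pvReduceGo fuel (pre.take (pre.length - 1 - k)
                ++ [PVElem.tre (.node (PySem.Str.slice item (some 1) none)
                      (pvToKids (pre.drop (pre.length - 1 - k + 1)))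
                      ("(" ++ PySem.Str.slice item (some 1) none ++ " "
                        ++ PySem.Str.join " "
                            (pvForestTexts (pvToKids (pre.drop (pre.length - 1 - k + 1))))
                        ++ ")"))]
                ++ post) := by
            simp only [pvReduceGo, hsp, hk]
            rw [if_pos hk1]
          have hih := ih (pre.take (pre.length - 1 - k)
                ++ [PVElem.tre (.node (PySem.Str.slice item (some 1) none)
                      (pvToKids (pre.drop (pre.length - 1 - k + 1)))
                      ("(" ++ PySem.Str.slice item (some 1) none ++ " "
                        ++ PySem.Str.join " "
                            (pvForestTexts (pvToKids (pre.drop (pre.length - 1 - k + 1))))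
                        ++ ")"))]
                ++ post) (by
              rw [htake]
              have hplen : pre.length = b.length + 1 + f.length := by
                rw [hpre]
                simp only [List.length_append, List.length_reverse, List.length_cons]
                omega
              simp only [List.length_append, List.length_reverse, List.length_cons,
                List.length_nil]
              omega)
          refine ⟨?_, fun e' he' => hih.2 e' (hred ▸ he')⟩
          rw [hred, hih.1, split_fold hsp, hstep, List.append_assoc,
            genFold_append, genFold_append,
            genFold_noclose _ _ (fun y hy =>
              (pvSplitB_some_spec hsp).1 y (List.mem_of_mem_take hy)),
            List.append_nil, htake]
          show pvGenFold post (_ :: (b.reverse.map pvEntry).reverse) = _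
          rw [htxt]
          congr 2
          simp

lemma reduce_gen (elems : List PVElem) :
    pvGenFold (pvReduceB elems) [] = pvGenFold elems [] ∧
    (∀ e ∈ pvReduceB elems, pvIsClose e = false) :=
  reduce_go elems.length elems (le_refl _)

lemma countsFold (lk rk : String) (l : List String) :
    l.foldl (fun (c : Int × Int) item =>
      (if item == lk then c.1 + 1 else c.1, if item == rk then c.2 + 1 else c.2)) (1, 0)
    = (1 + (l.count lk : Int), (l.count rk : Int)) := by
  rw [PySem.List.foldl_prod_mk (f := fun acc item => if item == lk then acc + 1 else acc)
      (g := fun acc item => if item == rk then acc + 1 else acc),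
    PySem.List.foldl_beq_add_one, PySem.List.foldl_beq_add_one]
  simp

lemma pre_eq (seq : List String) : pvPreA seq = pvPreB seq := by
  match seq with
  | [] => rfl
  | lk :: rest => simp only [pvPreA, pvPreB, countsFold, PySem.List.count]

lemma post_eq (s : String) : pvPostA s = pvPostB s := by
  simp only [pvPostA, pvPostB, PySem.List.foldl_append_if_eq_filter, List.nil_append]

-- the two passes compute the same top-level texts
lemma stack_eq (l : List String) :
    (l.foldl pvStepA []).reverse.map Prod.fst = (pvReduceB (l.map PVElem.tok)).map pvTextB := by
  have h1 := genFold_tok l []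
  obtain ⟨h2, h3⟩ := reduce_gen (l.map PVElem.tok)
  rw [← h1, ← h2, genFold_noclose _ _ h3]
  simp [List.map_map]
  exact fun e _ => pvEntry_fst e

-- ===== VERDICT (by name: the statement is the Claim_ definition above) =====
theorem seq2tree_spec : Claim_equal_seq2tree := by
  intro translate _ hpre
  unfold Spec_seq2tree seq2tree seq2tree_alt
  match translate with
  | [] => exact absurd rfl hpre
  | t0 :: rest =>
    simp only [pre_eq, post_eq, stack_eq]
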